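-- pv_equiv track=rewrite | github.com/masa-u00/Cloud | other_method/test_synth.py | identifiable
-- ===== SOURCE A (Python) =====
-- def are_disjoint(sets):
--     disjoint = True
--     union = set()
--     for s in sets:
--         for x in s:
--             if x in union:
--                 disjoint = False
--                 break
--             union.add(x)
--     return disjoint
--
-- def identifiable(dom_f, f, N):
--     # check if f(x) + supp N are disjoint for x in domain of f
--     supp_N = set(N)
--     decomps = []
--     for x in dom_f:
--         u = f[x]
--         supp_addition = set([u + n for n in supp_N])
--         decomps.append(supp_addition)
--     non_overlapping_noise = are_disjoint(decomps)
--     return not non_overlapping_noise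
-- ===== SOURCE B (Python) =====
-- def identifiable(dom_f, f, N):
--     # flatten all shifted-noise sums; a collision exists iff the flat list has a duplicate
--     supp_N = set(N)
--     all_sums = [f[x] + n for x in dom_f for n in supp_N]
--     return len(all_sums) != len(set(all_sums))
-- ===== Notes on version B (the rewrite author's own statement) =====
-- stated objective: simpler
-- what changed: Replaces the per-x set construction plus incremental union-membership scan with early break by one flat list of all sums f[x]+n and a single count-vs-distinct-count comparison (within-x sums are automatically distinct, so a duplicate in the flat list is exactly an overlap between two x's sets).
import Mathlib
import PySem

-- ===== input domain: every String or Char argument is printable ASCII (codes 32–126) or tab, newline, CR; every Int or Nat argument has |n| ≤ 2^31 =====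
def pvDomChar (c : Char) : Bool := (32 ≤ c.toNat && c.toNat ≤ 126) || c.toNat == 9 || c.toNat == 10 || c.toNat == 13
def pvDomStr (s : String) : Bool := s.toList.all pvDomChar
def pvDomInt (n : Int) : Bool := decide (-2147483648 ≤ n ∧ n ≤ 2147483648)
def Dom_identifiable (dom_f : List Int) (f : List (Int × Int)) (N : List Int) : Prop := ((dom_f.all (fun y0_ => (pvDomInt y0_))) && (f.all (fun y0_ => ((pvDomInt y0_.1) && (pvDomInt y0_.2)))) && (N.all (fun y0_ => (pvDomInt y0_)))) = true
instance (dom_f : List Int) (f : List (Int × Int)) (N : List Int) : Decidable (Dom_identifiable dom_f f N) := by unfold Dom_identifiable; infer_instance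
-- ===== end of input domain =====

-- B flattens all sums f[x]+n into one list and tests count vs distinct count, replacing
-- A's per-x sets and incremental union-membership scan; equivalence proved on Pre_ (keys present).

-- ===== PORT A =====
-- inner loop of are_disjoint: 'for x in s: if x in union: disjoint=False; break; union.add(x)'
def pvInner (u : PySem.Set Int) : List Int → Bool × PySem.Set Int
  | [] => (true, u)
  | x :: xs => if PySem.Set.contains u x then (false, u) else pvInner (PySem.Set.add u x) xs

-- one step of the outer loop of are_disjoint
def pvStep (st : Bool × PySem.Set Int) (s : List Int) : Bool × PySem.Set Int :=
  let r := pvInner st.2 s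
  (st.1 && r.1, r.2)

def pvAreDisjoint (sets : List (List Int)) : Bool :=
  (sets.foldl pvStep (true, PySem.Set.empty)).1

def identifiable (dom_f : List Int) (f : List (Int × Int)) (N : List Int) : Bool :=
  let supp_N : PySem.Set Int := PySem.Set.ofList N
  let decomps : List (List Int) := dom_f.map (fun x =>
    let u := (PySem.Dict.get? (PySem.Dict.mk f) x).getD 0   -- f[x]; Pre_ guarantees the key is present
    PySem.Set.ofList (supp_N.map (fun n => u + n)))
  !(pvAreDisjoint decomps)

-- ===== PORT B =====
def identifiable_alt (dom_f : List Int) (f : List (Int × Int)) (N : List Int) : Bool :=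
  let supp_N : PySem.Set Int := PySem.Set.ofList N
  let all_sums : List Int := dom_f.flatMap (fun x =>
    supp_N.map (fun n => (PySem.Dict.get? (PySem.Dict.mk f) x).getD 0 + n))
  decide (all_sums.length ≠ (PySem.Set.ofList all_sums).length)

-- ===== PRECONDITION & SPEC =====
-- Pre_ excludes inputs where some x in dom_f is not a key of f: there both A and B raise KeyError.
def Pre_identifiable (dom_f : List Int) (f : List (Int × Int)) (N : List Int) : Prop :=
  ∀ x ∈ dom_f, x ∈ f.map Prod.fst
instance (dom_f : List Int) (f : List (Int × Int)) (N : List Int) : Decidable (Pre_identifiable dom_f f N) := by unfold Pre_identifiable; infer_instance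

def pvWitness_identifiable : List Int × (List (Int × Int)) × List Int :=
  ([1, 2], [(1, 0), (2, 3)], [0, 5])
def Spec_identifiable (dom_f : List Int) (f : List (Int × Int)) (N : List Int) (out : Bool) : Prop := out = identifiable_alt dom_f f N
instance (dom_f : List Int) (f : List (Int × Int)) (N : List Int) (out : Bool) : Decidable (Spec_identifiable dom_f f N out) := by unfold Spec_identifiable; infer_instance

-- ===== CLAIM (what is proved, stated in full; the proofs are below) =====
def Claim_equal_identifiable : Prop := ∀ (dom_f : List Int) (f : List (Int × Int)) (N : List Int), Dom_identifiable dom_f f N → Pre_identifiable dom_f f N → Spec_identifiable dom_f f N (identifiable dom_f f N)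

-- ===== LEMMAS AND PROOFS =====

-- Python's set() keeps exactly the distinct elements: length unchanged iff no duplicate.
lemma pv_len_ofList_eq_iff (l : List Int) :
    (PySem.Set.ofList l).length = l.length ↔ l.Nodup := by
  induction l using List.reverseRecOn with
  | nil => simp
  | append_singleton xs x ih =>
    rw [PySem.Set.ofList_append_singleton]
    by_cases hx : x ∈ PySem.Set.ofList xs
    · have hx' : x ∈ xs := (PySem.Set.mem_ofList xs x).1 hx
      rw [PySem.Set.add_of_mem hx]
      have hle := PySem.Set.length_ofList_le (xs := xs)
      simp only [List.length_append, List.length_singleton, List.nodup_append,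
        List.nodup_singleton, true_and]
      constructor
      · intro h; omega
      · rintro ⟨-, hdis⟩
        exact absurd rfl (hdis x hx' x (List.mem_singleton_self x))
    · have hx' : x ∉ xs := fun h => hx ((PySem.Set.mem_ofList xs x).2 h)
      rw [PySem.Set.add_of_not_mem hx]
      simp only [List.length_append, List.length_singleton, List.nodup_append,
        List.nodup_singleton, true_and]
      constructor
      · intro h
        refine ⟨ih.1 (by omega), fun a ha b hb he => ?_⟩
        rw [List.mem_singleton] at hb; subst hb
        exact hx' (he ▸ ha)
      · rintro ⟨hnd, -⟩
        have := ih.2 hnd; omega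

-- inner loop of are_disjoint on a block disjoint from the union: succeeds, union grows by the block
lemma pv_inner_disjoint (s : List Int) : ∀ (u : PySem.Set Int),
    (∀ x ∈ s, x ∉ u) → s.Nodup → pvInner u s = (true, u ++ s) := by
  induction s with
  | nil => intro u _ _; simp [pvInner]
  | cons x xs ih =>
    intro u h hnd
    have hxu : x ∉ u := h x List.mem_cons_self
    have hc : PySem.Set.contains u x = false :=
      Bool.eq_false_iff.2 (fun hb => hxu ((PySem.Set.contains_iff u x).1 hb))
    rw [pvInner, hc]
    simp only [Bool.false_eq_true, if_false]
    rw [PySem.Set.add_of_not_mem hxu]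
    have hrec := ih (u ++ [x]) (fun y hy hmem => by
      rcases List.mem_append.1 hmem with hm | hm
      · exact h y (List.mem_cons_of_mem _ hy) hm
      · exact (List.nodup_cons.1 hnd).1 ((List.mem_singleton.1 hm) ▸ hy))
      (List.nodup_cons.1 hnd).2
    rw [hrec]; simp

-- inner loop on a block that meets the union: reports a collision
lemma pv_inner_hit (s : List Int) : ∀ (u : PySem.Set Int),
    (∃ x ∈ s, x ∈ u) → (pvInner u s).1 = false := by
  induction s with
  | nil => rintro u ⟨x, hx, -⟩; exact absurd hx List.not_mem_nil
  | cons x xs ih =>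
    rintro u ⟨y, hy, hyu⟩
    by_cases hxu : x ∈ u
    · have hc : PySem.Set.contains u x = true := (PySem.Set.contains_iff u x).2 hxu
      rw [pvInner, hc]; simp
    · have hc : PySem.Set.contains u x = false :=
        Bool.eq_false_iff.2 (fun hb => hxu ((PySem.Set.contains_iff u x).1 hb))
      rw [pvInner, hc]
      simp only [Bool.false_eq_true, if_false]
      rcases List.mem_cons.1 hy with rfl | hy'
      · exact absurd hyu hxu
      · exact ih _ ⟨y, hy', (PySem.Set.mem_add u x y).2 (Or.inl hyu)⟩

-- once 'disjoint' is False it stays False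
lemma pv_outer_false (sets : List (List Int)) : ∀ (u : PySem.Set Int),
    (sets.foldl pvStep (false, u)).1 = false := by
  induction sets with
  | nil => intro u; rfl
  | cons s sets ih =>
    intro u
    have : pvStep (false, u) s = (false, (pvInner u s).2) := by simp [pvStep]
    rw [List.foldl_cons, this]
    exact ih _

-- the whole scan succeeds iff the union so far together with all blocks is duplicate-free
lemma pv_outer_true (sets : List (List Int)) (hs : ∀ s ∈ sets, s.Nodup) :
    ∀ (u : PySem.Set Int), u.Nodup →
    ((sets.foldl pvStep (true, u)).1 = true ↔ (u ++ sets.flatten).Nodup) := by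
  induction sets with
  | nil => intro u hu; simpa using hu
  | cons s sets ih =>
    intro u hu
    have hsnd : s.Nodup := hs s List.mem_cons_self
    by_cases hex : ∃ x ∈ s, x ∈ u
    · obtain ⟨x, hx, hxu⟩ := hex
      have hstep : pvStep (true, u) s = (false, (pvInner u s).2) := by
        simp [pvStep, pv_inner_hit s u ⟨x, hx, hxu⟩]
      rw [List.foldl_cons, hstep, pv_outer_false]
      constructor
      · intro h; exact absurd h Bool.false_ne_true
      · intro h
        exfalso
        rw [List.flatten_cons, ← List.append_assoc] at h
        have h1 := (List.nodup_append.1 h).1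
        have h2 := (List.nodup_append.1 h1).2.2
        exact h2 x hxu x hx rfl
    · have hdis : ∀ x ∈ s, x ∉ u := fun x hx hxu => hex ⟨x, hx, hxu⟩
      have hstep : pvStep (true, u) s = (true, u ++ s) := by
        simp [pvStep, pv_inner_disjoint s u hdis hsnd]
      rw [List.foldl_cons, hstep]
      have hun : (u ++ s).Nodup := by
        rw [List.nodup_append]
        exact ⟨hu, hsnd, fun a ha b hb he => hdis b hb (he ▸ ha)⟩
      rw [ih (fun t ht => hs t (List.mem_cons_of_mem _ ht)) (u ++ s) hun,
        List.flatten_cons, ← List.append_assoc]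

-- each per-x block of sums is duplicate-free (distinct noises, shifted by the same amount)
lemma pv_block_nodup (f : List (Int × Int)) (N : List Int) (x : Int) :
    ((PySem.Set.ofList N).map
      (fun n => (PySem.Dict.get? (PySem.Dict.mk f) x).getD 0 + n)).Nodup :=
  (PySem.Set.nodup_ofList N).map (fun a b h => by omega)

-- the two ports agree (the claim, without its Dom/Pre hypotheses)
lemma pv_main (dom_f : List Int) (f : List (Int × Int)) (N : List Int) :
    identifiable dom_f f N = identifiable_alt dom_f f N := by
  unfold identifiable identifiable_alt
  show (!pvAreDisjoint (dom_f.map (fun x => PySem.Set.ofList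
      ((PySem.Set.ofList N).map (fun n => (PySem.Dict.get? (PySem.Dict.mk f) x).getD 0 + n)))))
    = decide ¬(dom_f.flatMap (fun x =>
        (PySem.Set.ofList N).map (fun n => (PySem.Dict.get? (PySem.Dict.mk f) x).getD 0 + n))).length
      = (PySem.Set.ofList (dom_f.flatMap (fun x =>
        (PySem.Set.ofList N).map (fun n => (PySem.Dict.get? (PySem.Dict.mk f) x).getD 0 + n)))).length
  set L : Int → List Int :=
    fun x => (PySem.Set.ofList N).map (fun n => (PySem.Dict.get? (PySem.Dict.mk f) x).getD 0 + n)
    with hL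
  have hblocks : dom_f.map (fun x => PySem.Set.ofList (L x)) = dom_f.map L :=
    List.map_congr_left (fun x _ =>
      PySem.Set.ofList_eq_self_of_nodup _ (pv_block_nodup f N x))
  have hA : pvAreDisjoint (dom_f.map (fun x => PySem.Set.ofList (L x))) = true
      ↔ (dom_f.flatMap L).Nodup := by
    unfold pvAreDisjoint
    rw [hblocks,
      pv_outer_true (dom_f.map L)
        (by rintro s hs; obtain ⟨x, -, rfl⟩ := List.mem_map.1 hs; exact pv_block_nodup f N x)
        PySem.Set.empty List.nodup_nil]
    rw [show (PySem.Set.empty : PySem.Set Int) ++ (dom_f.map L).flatten = (dom_f.map L).flatten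
      from List.nil_append _]
    rw [List.flatMap_def]
  have hB : (decide ¬((dom_f.flatMap L).length = (PySem.Set.ofList (dom_f.flatMap L)).length))
      = !decide (dom_f.flatMap L).Nodup := by
    by_cases hn : (dom_f.flatMap L).Nodup
    · have he := (pv_len_ofList_eq_iff (dom_f.flatMap L)).2 hn
      simp [hn, he]
    · have hne : (dom_f.flatMap L).length ≠ (PySem.Set.ofList (dom_f.flatMap L)).length :=
        fun h => hn ((pv_len_ofList_eq_iff _).1 h.symm)
      rw [decide_eq_false hn, Bool.not_false, decide_eq_true_eq]
      exact hne
  rw [hB]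
  cases h : pvAreDisjoint (dom_f.map (fun x => PySem.Set.ofList (L x))) with
  | true => simp [hA.1 h]
  | false =>
    have hnd : ¬ (dom_f.flatMap L).Nodup := fun hn => by rw [hA.2 hn] at h; cases h
    simp [hnd]

-- ===== VERDICT (by name: the statement is the Claim_ definition above) =====
theorem identifiable_spec : Claim_equal_identifiable := by
  intro dom_f f N _ _
  exact pv_main dom_f f N
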